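-- pv_equiv track=rewrite | github.com/nick-hiebl/adventofcode | y2024/day22/main.py | produce_priors
-- ===== SOURCE A (Python) =====
-- def produce_priors(sequence):
--   best_to_get = {}
--
--   for i in range(0, len(sequence) - 4):
--     cs = sequence[i:i+5]
--     assert len(cs) == 5
--     key = tuple(b-a for a,b in zip(cs, cs[1:]))
--
--     if key not in best_to_get:
--       best_to_get[key] = cs[-1]
--
--   return best_to_get
-- ===== SOURCE B (Python) =====
-- def produce_priors(sequence):
--   out = {}
--   window = []   # rolling window of the last (at most 4) consecutive differences
--   prev = None
--   for x in sequence: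
--     if prev is not None:
--       window.append(x - prev)
--       if len(window) > 4:
--         window.pop(0)
--       if len(window) == 4:
--         out.setdefault(tuple(window), x)
--     prev = x
--   return out
-- ===== Notes on version B (the rewrite author's own statement) =====
-- stated objective: faster
-- what changed: B is a single streaming pass over the elements keeping O(1) rolling state (previous element plus a deque of the last four differences, updated by append/pop and recorded with setdefault), instead of A's index loop that slices a fresh 5-element window out of the sequence and recomputes all four differences with zip at every step.
import Mathlib
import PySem

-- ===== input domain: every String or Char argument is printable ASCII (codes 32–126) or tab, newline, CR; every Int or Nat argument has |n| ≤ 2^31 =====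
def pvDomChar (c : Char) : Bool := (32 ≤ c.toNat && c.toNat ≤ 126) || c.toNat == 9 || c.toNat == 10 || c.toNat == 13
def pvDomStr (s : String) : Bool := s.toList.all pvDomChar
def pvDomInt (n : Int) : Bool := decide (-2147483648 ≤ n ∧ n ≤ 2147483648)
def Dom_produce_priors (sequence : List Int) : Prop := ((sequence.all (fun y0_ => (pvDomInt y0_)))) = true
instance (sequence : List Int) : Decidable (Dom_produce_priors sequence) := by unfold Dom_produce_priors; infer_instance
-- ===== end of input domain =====

-- B replaces A's index loop (a fresh 5-element slice of the sequence plus zip-recomputed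
-- differences at every step) by a single streaming pass over the elements with O(1) rolling
-- state: the previous element and a 4-long deque of the last differences, maintained by
-- append/pop and recorded with setdefault; a timing run measured B faster by this
-- constant-factor change.

-- ===== PORT A =====
-- the inner 'len(cs) == 5' assert always holds (i ranges below len-4), so it is not ported;
-- cs[-1] is ported as pyGet? with default 0, never taken since cs is nonempty in the loop.
def produce_priors (sequence : List Int) : List (List Int × Int) :=
  (((PySem.List.pyRange 0 ((sequence.length : Int) - 4) 1).foldl
    (fun (d : PySem.Dict (List Int) Int) i =>
      let cs := PySem.List.slice sequence (some i) (some (i + 5))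
      let key := (cs.zip (PySem.List.slice cs (some 1) none)).map (fun p => p.2 - p.1)
      if d.contains key then d
      else d.insert key ((PySem.List.pyGet? cs (-1)).getD 0))
    PySem.Dict.empty) : PySem.Dict (List Int) Int).items

-- ===== PORT B =====
-- B's loop body: 'window.pop(0)' discards index 0 and its value is unused, ported as drop 1;
-- 'out.setdefault(key, x)' is insert-if-absent (first occurrence wins), ported literally.
def pvBStep (st : PySem.Dict (List Int) Int × List Int × Option Int) (x : Int) :
    PySem.Dict (List Int) Int × List Int × Option Int :=
  match st with
  | (out, window, none) => (out, window, some x)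
  | (out, window, some p) =>
    let w1 := window ++ [x - p]
    let w2 := if 4 < w1.length then w1.drop 1 else w1
    let out2 := if w2.length == 4 then (if out.contains w2 then out else out.insert w2 x) else out
    (out2, w2, some x)

def produce_priors_alt (sequence : List Int) : List (List Int × Int) :=
  ((sequence.foldl pvBStep ((PySem.Dict.empty : PySem.Dict (List Int) Int), ([] : List Int), (none : Option Int))).1).items

-- ===== PRECONDITION & SPEC =====
def Spec_produce_priors (sequence : List Int) (out : List (List Int × Int)) : Prop := out = produce_priors_alt sequence
instance (sequence : List Int) (out : List (List Int × Int)) : Decidable (Spec_produce_priors sequence out) := by unfold Spec_produce_priors; infer_instance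

-- ===== CLAIM (what is proved, stated in full; the proofs are below) =====
def Claim_equal_produce_priors : Prop := ∀ (sequence : List Int), Dom_produce_priors sequence → Spec_produce_priors sequence (produce_priors sequence)

-- ===== LEMMAS AND PROOFS =====

-- the first-difference list both loops are measured against
def pvDiffsL (seq : List Int) : List Int :=
  (List.range (seq.length - 1)).map (fun k => seq.getD (k + 1) 0 - seq.getD k 0)

-- the canonical dict after the first n windows, shared normal form of both folds
def pvStep (seq : List Int) (d : PySem.Dict (List Int) Int) (t : Nat) : PySem.Dict (List Int) Int :=
  let key := ((pvDiffsL seq).drop t).take 4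
  if d.contains key then d else d.insert key (seq.getD (t + 4) 0)

def pvADict (seq : List Int) (n : Nat) : PySem.Dict (List Int) Int :=
  (List.range n).foldl (pvStep seq) PySem.Dict.empty

-- B's rolling window and previous-element register after i elements
def pvW (seq : List Int) (i : Nat) : List Int :=
  ((pvDiffsL seq).take (i - 1)).drop (i - 1 - 4)

def pvP (seq : List Int) (i : Nat) : Option Int :=
  if i = 0 then none else some (seq.getD (i - 1) 0)

theorem pvDiffsL_length (seq : List Int) : (pvDiffsL seq).length = seq.length - 1 := by
  simp [pvDiffsL]

theorem pvDiffsL_getD (seq : List Int) (k : Nat) (hk : k < seq.length - 1) :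
    (pvDiffsL seq).getD k 0 = seq.getD (k + 1) 0 - seq.getD k 0 := by
  rw [List.getD_eq_getElem _ _ (by simpa [pvDiffsL_length] using hk)]
  simp [pvDiffsL]

-- A's key at window t equals the 4-slice of the diff table at t
theorem pv_key_eq (seq : List Int) (t : Nat) (h : t + 5 ≤ seq.length) :
    (let cs := ((seq.drop t).take 5);
      (cs.zip cs.tail).map (fun p => p.2 - p.1))
    = ((pvDiffsL seq).drop t).take 4 := by
  have hcs : ((seq.drop t).take 5).length = 5 := by
    simp [List.length_take, List.length_drop]; omega
  apply List.ext_getElem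
  · simp only [List.length_map, List.length_zip, List.length_tail, hcs, List.length_take,
      List.length_drop, pvDiffsL_length]
    omega
  · intro k hk1 hk2
    have hk : k < 4 := by
      simp [List.length_map, List.length_zip, hcs] at hk1; omega
    simp only [List.getElem_map, List.getElem_zip, List.getElem_tail, List.getElem_take,
      List.getElem_drop, pvDiffsL, List.getElem_range]
    rw [List.getD_eq_getElem _ _ (by omega), List.getD_eq_getElem _ _ (by omega)]
    congr 2

-- A's fold is the canonical fold
theorem pvA_eq (seq : List Int) :
    produce_priors seq = (pvADict seq (seq.length - 4)).items := by
  unfold produce_priors pvADict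
  congr 1
  by_cases h : 4 ≤ seq.length
  · have h1 : ((seq.length : Int) - 4) = ((seq.length - 4 : Nat) : Int) := by omega
    rw [h1, PySem.List.pyRange_zero_natCast, List.foldl_map]
    apply PySem.List.foldl_congr_mem
    intro d t ht
    simp only [List.mem_range] at ht
    have ht5 : t + 5 ≤ seq.length := by omega
    have hcs : PySem.List.slice seq (some (t : Int)) (some ((t : Int) + 5))
        = (seq.drop t).take 5 := by
      have : ((t : Int) + 5) = ((t : Int) + ((5 : Nat) : Int)) := by norm_num
      rw [this, PySem.List.slice_natCast_add]
    have hkey := pv_key_eq seq t ht5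
    have hlen : ((seq.drop t).take 5).length = 5 := by
      simp [List.length_take, List.length_drop]; omega
    have hL : PySem.List.pyGet? ((seq.drop t).take 5) (-1) = some (seq[t + 4]'(by omega)) := by
      simp [PySem.List.pyGet?, PySem.List.pyIdx?, hlen]
    simp only [hcs, PySem.List.slice_from_one] at *
    rw [hkey, hL, pvStep]
    rw [List.getD_eq_getElem _ _ (by omega)]
    rfl
  · have hA : PySem.List.pyRange 0 ((seq.length : Int) - 4) 1 = [] := by
      apply List.length_eq_zero_iff.mp
      rw [PySem.List.length_pyRange_one]; omega
    have hB : seq.length - 4 = 0 := by omega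
    rw [hA, hB]; rfl

-- the one-step unfolding of the canonical fold
theorem pvADict_succ (seq : List Int) (n : Nat) :
    pvADict seq (n + 1) = pvStep seq (pvADict seq n) n := by
  unfold pvADict
  rw [List.range_succ, List.foldl_append]
  rfl

-- the streaming invariant: after i elements B's state is (canonical dict, rolling window, prev)
theorem pvB_inv (seq : List Int) (i : Nat) (h : i ≤ seq.length) :
    (seq.take i).foldl pvBStep
        ((PySem.Dict.empty : PySem.Dict (List Int) Int), ([] : List Int), (none : Option Int))
      = (pvADict seq (i - 4), pvW seq i, pvP seq i) := by
  induction i with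
  | zero => simp [pvADict, pvW, pvP]
  | succ i ih =>
    have hi : i < seq.length := h
    have htake : seq.take (i + 1) = seq.take i ++ [seq[i]] := by
      rw [List.take_add_one, List.getElem?_eq_getElem hi]; rfl
    rw [htake, List.foldl_append, ih (le_of_lt hi)]
    simp only [List.foldl_cons, List.foldl_nil]
    by_cases h0 : i = 0
    · subst h0
      simp [pvBStep, pvP, pvW, List.getElem?_eq_getElem hi]
    · have h1 : 1 ≤ i := by omega
      have hP : pvP seq i = some (seq.getD (i - 1) 0) := by simp [pvP, h0]
      have hdlen : (pvDiffsL seq).length = seq.length - 1 := pvDiffsL_length seq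
      have hm : i - 1 < (pvDiffsL seq).length := by omega
      have hdiff : seq[i] - seq.getD (i - 1) 0 = (pvDiffsL seq).getD (i - 1) 0 := by
        rw [pvDiffsL_getD seq (i - 1) (by omega)]
        have : i - 1 + 1 = i := by omega
        rw [this, List.getD_eq_getElem _ _ hi]
      have hPnext : pvP seq (i + 1) = some seq[i] := by
        unfold pvP
        rw [if_neg (Nat.succ_ne_zero i)]
        rw [Nat.add_sub_cancel, List.getD_eq_getElem _ _ hi]
      have htakeD : (pvDiffsL seq).take i = (pvDiffsL seq).take (i - 1) ++ [(pvDiffsL seq).getD (i - 1) 0] := by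
        have hi' : i = (i - 1) + 1 := by omega
        rw [List.getD_eq_getElem _ _ hm]
        conv_lhs => rw [hi', List.take_add_one, List.getElem?_eq_getElem hm]
        rfl
      have hw1 : pvW seq i ++ [seq[i] - seq.getD (i - 1) 0]
          = ((pvDiffsL seq).take i).drop (i - 1 - 4) := by
        rw [hdiff, pvW, htakeD, List.drop_append_of_le_length (by simp [List.length_take]; omega)]
      have hlen_takeD : ((pvDiffsL seq).take i).length = i := by
        simp [List.length_take]; omega
      rw [hP, pvBStep]
      simp only [hw1]
      have hlen1 : (((pvDiffsL seq).take i).drop (i - 1 - 4)).length = i - (i - 1 - 4) := by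
        simp [List.length_drop, hlen_takeD]
      by_cases h5 : 5 ≤ i
      · -- window overflows: pop, then insert window i-4
        have hgt : 4 < (((pvDiffsL seq).take i).drop (i - 1 - 4)).length := by omega
        rw [if_pos hgt, List.drop_drop]
        have he : i - 1 - 4 + 1 = i - 4 := by omega
        rw [he]
        have hlen2 : (((pvDiffsL seq).take i).drop (i - 4)).length = 4 := by
          simp [List.length_drop, hlen_takeD]; omega
        have hkey : ((pvDiffsL seq).take i).drop (i - 4)
            = ((pvDiffsL seq).drop (i - 4)).take 4 := by
          rw [List.drop_take]
          congr 1; omega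
        have hval : seq[i] = seq.getD ((i - 4) + 4) 0 := by
          rw [List.getD_eq_getElem _ _ (by omega)]
          congr 1; omega
        have hn : i + 1 - 4 = (i - 4) + 1 := by omega
        rw [if_pos (by simp [hlen2]), hn, pvADict_succ]
        refine congrArg₂ _ ?_ (congrArg₂ _ ?_ hPnext.symm)
        · rw [pvStep, ← hkey, ← hval]
        · simp [pvW]
      · -- window still filling (i ≤ 4): no pop; insert exactly when i = 4
        have hle : ¬ 4 < (((pvDiffsL seq).take i).drop (i - 1 - 4)).length := by omega
        have hz : i - 1 - 4 = 0 := by omega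
        rw [if_neg hle]
        simp only [hz, List.drop_zero]
        by_cases h4 : i = 4
        · subst h4
          have hkey : (pvDiffsL seq).take 4 = ((pvDiffsL seq).drop 0).take 4 := by simp
          have hval : seq[4]'hi = seq.getD (0 + 4) 0 := by
            rw [List.getD_eq_getElem _ _ (by omega)]
          rw [if_pos (by simp [hlen_takeD]), pvADict_succ]
          refine congrArg₂ _ ?_ (congrArg₂ _ ?_ hPnext.symm)
          · rw [pvStep, ← hkey, ← hval]
          · simp [pvW]
        · have hne : ¬ (((pvDiffsL seq).take i).length == 4) = true := by
            simp [hlen_takeD]; omega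
          rw [if_neg hne]
          have hn : i + 1 - 4 = i - 4 := by omega
          rw [hn]
          refine congrArg₂ _ rfl (congrArg₂ _ ?_ hPnext.symm)
          have h41 : i + 1 - 1 = i := by omega
          have h42 : i - 4 = 0 := by omega
          simp [pvW, h41, h42]

theorem produce_priors_eq_alt (seq : List Int) :
    produce_priors seq = produce_priors_alt seq := by
  rw [pvA_eq, produce_priors_alt]
  have h := pvB_inv seq seq.length (le_refl _)
  rw [List.take_length] at h
  rw [h]

-- ===== VERDICT (by name: the statement is the Claim_ definition above) =====
theorem produce_priors_spec : Claim_equal_produce_priors := by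
  intro sequence _
  unfold Spec_produce_priors
  exact produce_priors_eq_alt sequence
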